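-- pv_equiv track=rewrite | github.com/xkonjin/fullstackOS | fleet/pipeline/coverage.py | _build_dependency_chains
-- ===== SOURCE A (Python) =====
-- def _build_dependency_chains(
--     relevant_modules: list[str],
--     module_graph: list[dict],
-- ) -> dict[str, list[str]]:
--     """For each relevant module, find its direct dependencies."""
--     chains: dict[str, list[str]] = {}
--     for mod in relevant_modules:
--         deps = sorted(set(
--             e["target"] for e in module_graph
--             if e.get("source") == mod
--         ))
--         if deps:
--             chains[mod] = deps
--     return chains
-- ===== SOURCE B (Python) =====
-- def _build_dependency_chains(
--     relevant_modules: list[str],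
--     module_graph: list[dict],
-- ) -> dict[str, list[str]]:
--     """One grouping pass over the edges, then emit in relevant-module order."""
--     relevant = set(relevant_modules)
--     groups: dict[str, set] = {}
--     for e in module_graph:
--         src = e.get("source")
--         if src in relevant:
--             groups.setdefault(src, set()).add(e["target"])
--     return {
--         mod: sorted(groups[mod])
--         for mod in dict.fromkeys(relevant_modules)
--         if mod in groups
--     }
-- ===== Notes on version B (the rewrite author's own statement) =====
-- stated objective: faster
-- what changed: A rescans the whole edge list once per relevant module; B makes one grouping pass over the edges into a dict of target-sets keyed by relevant source, then emits the chains in deduplicated relevant-module order.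
import Mathlib
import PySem

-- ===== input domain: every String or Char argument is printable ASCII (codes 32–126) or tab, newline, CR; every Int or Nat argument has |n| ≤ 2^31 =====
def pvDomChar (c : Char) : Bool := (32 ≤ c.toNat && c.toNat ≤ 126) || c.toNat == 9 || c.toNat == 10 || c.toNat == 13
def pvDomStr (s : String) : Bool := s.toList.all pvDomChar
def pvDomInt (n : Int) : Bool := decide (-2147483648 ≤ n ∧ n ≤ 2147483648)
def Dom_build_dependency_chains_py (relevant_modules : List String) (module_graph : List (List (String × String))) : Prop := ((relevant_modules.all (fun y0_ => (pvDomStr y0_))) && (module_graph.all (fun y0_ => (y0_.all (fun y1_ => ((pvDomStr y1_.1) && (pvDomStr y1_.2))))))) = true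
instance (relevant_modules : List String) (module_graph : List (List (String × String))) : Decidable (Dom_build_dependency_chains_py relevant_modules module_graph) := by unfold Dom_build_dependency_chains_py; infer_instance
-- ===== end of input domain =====

-- B replaces A's nested relevant-modules × edges scan by one grouping pass over the edges
-- followed by an emission pass over the deduplicated relevant modules (objective: faster).


-- ===== PORT A =====
-- literal port of A: for each relevant module scan all edges, sort the distinct targets,
-- record the module if it has any. e["target"] is ported as `(… .get? "target").getD ""`;
-- the default is never read on Pre_ (which excludes exactly the KeyError inputs).
def build_dependency_chains_py (relevant_modules : List String) (module_graph : List (List (String × String))) : List (String × List String) :=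
  (relevant_modules.foldl
    (fun (chains : PySem.Dict String (List String)) mod =>
      let deps : List String :=
        PySem.List.sorted
          (PySem.Set.ofList
            ((module_graph.filter (fun e => (PySem.Dict.mk e).get? "source" == some mod)).map
              (fun e => ((PySem.Dict.mk e).get? "target").getD "")))
          (fun x => x)
      if deps ≠ [] then chains.insert mod deps else chains)
    PySem.Dict.empty).items

-- ===== PORT B =====
-- literal port of Source B: one pass over the edges grouping targets by source (for sources in
-- the relevant set), then a comprehension over dict.fromkeys(relevant_modules).
-- e["target"] is ported as `(… .get? "target").getD ""` exactly as in port A (exact on Pre_).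
def build_dependency_chains_py_alt (relevant_modules : List String) (module_graph : List (List (String × String))) : List (String × List String) :=
  let relevant : PySem.Set String := PySem.Set.ofList relevant_modules
  let groups : PySem.Dict String (PySem.Set String) :=
    module_graph.foldl
      (fun g e =>
        match (PySem.Dict.mk e).get? "source" with
        | some src =>
            if relevant.contains src then
              g.modify src PySem.Set.empty
                (fun s => PySem.Set.add s (((PySem.Dict.mk e).get? "target").getD ""))
            else g
        | none => g)
      PySem.Dict.empty
  (PySem.Set.ofList relevant_modules).filterMap
    (fun mod => (groups.get? mod).map (fun s => (mod, PySem.List.sorted s (fun x => x))))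

-- ===== PRECONDITION & SPEC =====
-- Pre_ excludes exactly the inputs where the Python A raises KeyError: an edge whose
-- "source" is a relevant module but which has no "target" key (B raises there too).
def Pre_build_dependency_chains_py (relevant_modules : List String) (module_graph : List (List (String × String))) : Prop :=
  (module_graph.all (fun e =>
    match (PySem.Dict.mk e).get? "source" with
    | some s => !(relevant_modules.contains s) || (PySem.Dict.mk e).contains "target"
    | none => true)) = true
instance (relevant_modules : List String) (module_graph : List (List (String × String))) : Decidable (Pre_build_dependency_chains_py relevant_modules module_graph) := by unfold Pre_build_dependency_chains_py; infer_instance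

def pvWitness_build_dependency_chains_py : List String × (List (List (String × String))) :=
  (["a", "b"], [[("source", "a"), ("target", "x")], [("source", "c")]])

def Spec_build_dependency_chains_py (relevant_modules : List String) (module_graph : List (List (String × String))) (out : List (String × List String)) : Prop := out = build_dependency_chains_py_alt relevant_modules module_graph
instance (relevant_modules : List String) (module_graph : List (List (String × String))) (out : List (String × List String)) : Decidable (Spec_build_dependency_chains_py relevant_modules module_graph out) := by unfold Spec_build_dependency_chains_py; infer_instance

-- ===== CLAIM (what is proved, stated in full; the proofs are below) =====
def Claim_equal_build_dependency_chains_py : Prop := ∀ (relevant_modules : List String) (module_graph : List (List (String × String))), Dom_build_dependency_chains_py relevant_modules module_graph → Pre_build_dependency_chains_py relevant_modules module_graph → Spec_build_dependency_chains_py relevant_modules module_graph (build_dependency_chains_py relevant_modules module_graph)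

-- ===== LEMMAS AND PROOFS =====

-- targets of the edges whose "source" is m, in edge order (with the same `.getD ""` reading
-- of e["target"] both ports use)
def pvTgts (module_graph : List (List (String × String))) (m : String) : List String :=
  (module_graph.filter (fun e => (PySem.Dict.mk e).get? "source" == some m)).map
    (fun e => ((PySem.Dict.mk e).get? "target").getD "")

def pvF (module_graph : List (List (String × String))) (m : String) : List String :=
  PySem.List.sorted (PySem.Set.ofList (pvTgts module_graph m)) (fun x => x)

-- the common normal form of both results
def pvChain (relevant_modules : List String) (module_graph : List (List (String × String))) : List (String × List String) :=
  (PySem.Set.ofList relevant_modules).filterMap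
    (fun m => if pvTgts module_graph m = [] then none else some (m, pvF module_graph m))

lemma pvOfList_eq_nil_iff {α : Type} [BEq α] [LawfulBEq α] (xs : List α) : PySem.Set.ofList xs = [] ↔ xs = [] := by
  cases xs with
  | nil => simp [PySem.Set.ofList_nil]
  | cons x xs => simp [PySem.Set.ofList_cons]

lemma pvF_eq_nil_iff (mg : List (List (String × String))) (m : String) :
    pvF mg m = [] ↔ pvTgts mg m = [] := by
  rw [pvF, PySem.List.sorted_eq_nil_iff, pvOfList_eq_nil_iff]

lemma pvChain_mem {rm : List String} {mg : List (List (String × String))}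
    {p : String × List String} (hp : p ∈ pvChain rm mg) :
    p.1 ∈ rm ∧ pvTgts mg p.1 ≠ [] ∧ p.2 = pvF mg p.1 := by
  rw [pvChain, List.mem_filterMap] at hp
  obtain ⟨m, hm, hf⟩ := hp
  by_cases h : pvTgts mg m = []
  · simp [h] at hf
  · simp [h] at hf
    subst hf
    exact ⟨(PySem.Set.mem_ofList _ _).1 hm, h, rfl⟩

lemma pvChain_mem_self {rm : List String} {mg : List (List (String × String))}
    {m : String} (hm : m ∈ rm) (ht : pvTgts mg m ≠ []) :
    (m, pvF mg m) ∈ pvChain rm mg := by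
  rw [pvChain, List.mem_filterMap]
  exact ⟨m, (PySem.Set.mem_ofList _ _).2 hm, by simp [ht]⟩

lemma pvChain_contains (rm : List String) (mg : List (List (String × String))) (m : String) :
    (PySem.Dict.mk (pvChain rm mg)).contains m = true ↔ (m ∈ rm ∧ pvTgts mg m ≠ []) := by
  rw [PySem.Dict.contains_iff_mem_keys]
  constructor
  · intro h
    simp only [PySem.Dict.keys_mk, List.mem_map] at h
    obtain ⟨p, hp, hpm⟩ := h
    obtain ⟨h1, h2, _⟩ := pvChain_mem hp
    exact ⟨hpm ▸ h1, hpm ▸ h2⟩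
  · rintro ⟨h1, h2⟩
    simp only [PySem.Dict.keys_mk, List.mem_map]
    exact ⟨(m, pvF mg m), pvChain_mem_self h1 h2, rfl⟩

lemma pvChain_nil (mg : List (List (String × String))) : pvChain [] mg = [] := by
  simp [pvChain, PySem.Set.ofList_nil]

lemma pvChain_append_singleton (rm : List String) (mg : List (List (String × String))) (m : String) :
    pvChain (rm ++ [m]) mg =
      if m ∈ rm then pvChain rm mg
      else pvChain rm mg ++ (if pvTgts mg m = [] then [] else [(m, pvF mg m)]) := by
  rw [pvChain, PySem.Set.ofList_append_singleton, PySem.Set.add_eq_ite]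
  by_cases hm : m ∈ rm
  · rw [if_pos ((PySem.Set.mem_ofList _ _).2 hm), if_pos hm]; rfl
  · rw [if_neg (fun h => hm ((PySem.Set.mem_ofList _ _).1 h)), if_neg hm, List.filterMap_append]
    rw [pvChain]
    congr 1
    by_cases ht : pvTgts mg m = [] <;> simp [ht]

-- A's fold builds exactly the dict whose items are pvChain
lemma pvFoldA (mg : List (List (String × String))) (rm : List String) :
    (rm.foldl
      (fun (chains : PySem.Dict String (List String)) mod =>
        let deps : List String :=
          PySem.List.sorted
            (PySem.Set.ofList
              ((mg.filter (fun e => (PySem.Dict.mk e).get? "source" == some mod)).map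
                (fun e => ((PySem.Dict.mk e).get? "target").getD "")))
            (fun x => x)
        if deps ≠ [] then chains.insert mod deps else chains)
      PySem.Dict.empty) = PySem.Dict.mk (pvChain rm mg) := by
  induction rm using List.reverseRecOn with
  | nil => rw [pvChain_nil]; rfl
  | append_singleton rs m ih =>
    rw [List.foldl_append, List.foldl_cons, List.foldl_nil, ih]
    show (if pvF mg m ≠ [] then (PySem.Dict.mk (pvChain rs mg)).insert m (pvF mg m)
          else PySem.Dict.mk (pvChain rs mg)) = PySem.Dict.mk (pvChain (rs ++ [m]) mg)
    rw [pvChain_append_singleton]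
    by_cases ht : pvTgts mg m = []
    · rw [if_neg (by simp [pvF_eq_nil_iff, ht])]
      by_cases hm : m ∈ rs <;> simp [hm, ht]
    · rw [if_pos (by simp [pvF_eq_nil_iff, ht])]
      by_cases hm : m ∈ rs
      · -- overwrite of an existing key with the identical value: items unchanged
        rw [if_pos hm]
        apply PySem.Dict.ext
        rw [PySem.Dict.items_insert_of_contains _ _ ((pvChain_contains rs mg m).2 ⟨hm, ht⟩)]
        show List.map _ (pvChain rs mg) = pvChain rs mg
        rw [List.map_congr_left (g := id), List.map_id]
        intro p hp
        obtain ⟨_, _, hval⟩ := pvChain_mem hp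
        by_cases hpm : p.1 = m
        · simp only [hpm, beq_self_eq_true, if_pos, id]
          exact Prod.ext_iff.2 ⟨hpm.symm, (hpm ▸ hval).symm⟩
        · simp [hpm]
      · rw [if_neg hm]
        apply PySem.Dict.ext
        rw [PySem.Dict.items_insert_of_not_contains _ _ (by
          rw [Bool.eq_false_iff]; intro h; exact hm ((pvChain_contains rs mg m).1 h).1)]
        simp [ht]

-- B's grouping fold: value accumulated at a relevant key m
lemma pvFoldB_getD (rm : List String) (mg : List (List (String × String))) (m : String)
    (hm : m ∈ rm) :
    ∀ g : PySem.Dict String (PySem.Set String),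
      (mg.foldl
        (fun g e =>
          match (PySem.Dict.mk e).get? "source" with
          | some src =>
              if (PySem.Set.ofList rm).contains src then
                g.modify src PySem.Set.empty
                  (fun s => PySem.Set.add s (((PySem.Dict.mk e).get? "target").getD ""))
              else g
          | none => g)
        g).getD m PySem.Set.empty
      = PySem.Set.update (g.getD m PySem.Set.empty) (pvTgts mg m) := by
  induction mg with
  | nil => intro g; simp [pvTgts, PySem.Set.update]
  | cons e mg ih =>
    intro g
    rw [List.foldl_cons]
    cases hsrc : (PySem.Dict.mk e).get? "source" with
    | none =>
      simp only [hsrc]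
      rw [ih g]
      have : ((PySem.Dict.mk e).get? "source" == some m) = false := by simp [hsrc]
      simp [pvTgts, this]
    | some src =>
      simp only [hsrc]
      by_cases hsm : src = m
      · subst hsm
        rw [if_pos ((PySem.Set.contains_iff _ _).2 ((PySem.Set.mem_ofList _ _).2 hm))]
        rw [ih _]
        rw [PySem.Dict.getD_modify]
        rw [if_pos rfl]
        have : ((PySem.Dict.mk e).get? "source" == some src) = true := by simp [hsrc]
        simp only [pvTgts, List.filter_cons, this, if_true, List.map_cons]
        rw [PySem.Set.update_cons]
      · have htg : ((PySem.Dict.mk e).get? "source" == some m) = false := by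
          simp [hsrc, hsm]
        have htgts : pvTgts (e :: mg) m = pvTgts mg m := by
          simp [pvTgts, htg]
        by_cases hc : (PySem.Set.ofList rm).contains src = true
        · rw [if_pos hc, ih _, PySem.Dict.getD_modify, if_neg (fun h => hsm h.symm), htgts]
        · rw [if_neg hc, ih g, htgts]

-- B's grouping fold: key presence at a relevant key m
lemma pvFoldB_contains (rm : List String) (mg : List (List (String × String))) (m : String)
    (hm : m ∈ rm) :
    ∀ g : PySem.Dict String (PySem.Set String),
      (mg.foldl
        (fun g e =>
          match (PySem.Dict.mk e).get? "source" with
          | some src =>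
              if (PySem.Set.ofList rm).contains src then
                g.modify src PySem.Set.empty
                  (fun s => PySem.Set.add s (((PySem.Dict.mk e).get? "target").getD ""))
              else g
          | none => g)
        g).contains m
      = (g.contains m || mg.any (fun e => (PySem.Dict.mk e).get? "source" == some m)) := by
  induction mg with
  | nil => intro g; simp
  | cons e mg ih =>
    intro g
    rw [List.foldl_cons]
    cases hsrc : (PySem.Dict.mk e).get? "source" with
    | none =>
      simp only [hsrc]
      rw [ih g]
      simp [List.any_cons, hsrc]
    | some src =>
      simp only [hsrc]
      by_cases hsm : src = m
      · subst hsm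
        rw [if_pos ((PySem.Set.contains_iff _ _).2 ((PySem.Set.mem_ofList _ _).2 hm))]
        rw [ih _, PySem.Dict.contains_modify]
        simp [List.any_cons, hsrc]
      · have htg : ((PySem.Dict.mk e).get? "source" == some m) = false := by
          simp [hsrc, hsm]
        by_cases hc : (PySem.Set.ofList rm).contains src = true
        · rw [if_pos hc, ih _, PySem.Dict.contains_modify]
          have : (m == src) = false := by
            rw [beq_eq_false_iff_ne]; exact Ne.symm hsm
          simp [List.any_cons, htg, this]
        · rw [if_neg hc, ih g]
          simp [List.any_cons, htg]
      
lemma pvTgts_eq_nil_iff_not_any (mg : List (List (String × String))) (m : String) :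
    pvTgts mg m = [] ↔ (mg.any (fun e => (PySem.Dict.mk e).get? "source" == some m)) = false := by
  simp [pvTgts, List.filter_eq_nil_iff, List.any_eq_false]

lemma pvB_eq_chain (rm : List String) (mg : List (List (String × String))) :
    build_dependency_chains_py_alt rm mg = pvChain rm mg := by
  rw [build_dependency_chains_py_alt, pvChain]
  apply List.filterMap_congr
  intro m hmem
  have hm : m ∈ rm := (PySem.Set.mem_ofList _ _).1 hmem
  by_cases ht : pvTgts mg m = []
  · have hcont := pvFoldB_contains rm mg m hm PySem.Dict.empty
    rw [(pvTgts_eq_nil_iff_not_any mg m).1 ht] at hcont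
    simp only [PySem.Dict.contains_empty, Bool.false_or] at hcont
    rw [PySem.Dict.contains_eq_isSome_get?] at hcont
    rw [Option.isSome_eq_false_iff, Option.isNone_iff_eq_none] at hcont
    simp only [hcont, Option.map_none, ht, if_pos]
  · have hany : (mg.any (fun e => (PySem.Dict.mk e).get? "source" == some m)) = true := by
      rcases Bool.eq_false_or_eq_true
          (mg.any fun e => (PySem.Dict.mk e).get? "source" == some m) with h | h
      · exact h
      · exact absurd ((pvTgts_eq_nil_iff_not_any mg m).2 h) ht
    have hcont := pvFoldB_contains rm mg m hm PySem.Dict.empty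
    rw [hany, Bool.or_true, PySem.Dict.contains_eq_isSome_get?] at hcont
    obtain ⟨v, hv⟩ := Option.isSome_iff_exists.mp hcont
    have hgetd := pvFoldB_getD rm mg m hm PySem.Dict.empty
    rw [PySem.Dict.getD_eq_get?_getD, hv, PySem.Dict.getD_empty] at hgetd
    simp only [Option.getD_some] at hgetd
    rw [hv, if_neg ht]
    simp only [Option.map_some]
    have hupd : PySem.Set.update PySem.Set.empty (pvTgts mg m) = PySem.Set.ofList (pvTgts mg m) :=
      PySem.Set.update_nil_left _
    rw [hupd] at hgetd
    rw [pvF, hgetd]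

-- ===== VERDICT (by name: the statement is the Claim_ definition above) =====
theorem build_dependency_chains_py_spec : Claim_equal_build_dependency_chains_py := by
  intro rm mg _ _
  unfold Spec_build_dependency_chains_py
  rw [pvB_eq_chain]
  show (_ : PySem.Dict String (List String)).items = _
  rw [pvFoldA mg rm]
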